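-- pv_equiv track=rewrite | github.com/DGbolaga/AdventOfCode2025 | day-2/a.py | check
-- ===== SOURCE A (Python) =====
-- def check(a):
--      i = 0
--      mid = len(a) // 2
--      if len(a) % 2 != 0:
--          return False
--      is_valid = True
--      while i < mid:
--          if a[i] != a[mid+i]:
--              is_valid = False
--              break
--          i+=1
--      return is_valid
-- ===== SOURCE B (Python) =====
-- def check(a):
--     mid = len(a) // 2
--     return len(a) % 2 == 0 and a[:mid] == a[mid:]
-- ===== Notes on version B (the rewrite author's own statement) =====
-- stated objective: simpler
-- what changed: Replaces the index loop with running flag and early break by a single slice-equality expression comparing the two halves.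
import Mathlib
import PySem

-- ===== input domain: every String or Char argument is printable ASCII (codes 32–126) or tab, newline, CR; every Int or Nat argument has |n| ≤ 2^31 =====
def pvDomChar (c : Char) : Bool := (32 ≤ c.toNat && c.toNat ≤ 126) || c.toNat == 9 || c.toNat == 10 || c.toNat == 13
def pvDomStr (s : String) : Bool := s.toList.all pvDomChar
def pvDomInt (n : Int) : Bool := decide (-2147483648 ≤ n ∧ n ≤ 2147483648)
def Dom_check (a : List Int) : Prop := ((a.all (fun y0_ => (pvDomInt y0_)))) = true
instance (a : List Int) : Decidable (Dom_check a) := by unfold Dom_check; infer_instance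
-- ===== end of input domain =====

-- B replaces A's index loop / flag / break with a single slice-equality comparison of the two halves (simpler).

-- ===== PORT A =====
-- while i < mid: if a[i] != a[mid+i]: is_valid = False; break; i += 1
def checkLoop (a : List Int) (mid i : Int) : Bool :=
  if _h : i < mid then
    if PySem.List.pyGetD a i 0 ≠ PySem.List.pyGetD a (mid + i) 0 then false
    else checkLoop a mid (i + 1)
  else true
termination_by (mid - i).toNat
decreasing_by omega

def check (a : List Int) : Bool :=
  let mid : Int := PySem.Int.floordiv (a.length : Int) 2
  if PySem.Int.mod (a.length : Int) 2 ≠ 0 then false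
  else checkLoop a mid 0

-- ===== PORT B =====
def check_alt (a : List Int) : Bool :=
  let mid : Int := PySem.Int.floordiv (a.length : Int) 2
  (PySem.Int.mod (a.length : Int) 2 == 0)
    && (PySem.List.slice a none (some mid) == PySem.List.slice a (some mid) none)

-- ===== PRECONDITION & SPEC =====
def Spec_check (a : List Int) (out : Bool) : Prop := out = check_alt a
instance (a : List Int) (out : Bool) : Decidable (Spec_check a out) := by unfold Spec_check; infer_instance

-- ===== CLAIM (what is proved, stated in full; the proofs are below) =====
def Claim_equal_check : Prop := ∀ (a : List Int), Dom_check a → Spec_check a (check a)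

-- ===== LEMMAS AND PROOFS =====

theorem checkLoop_iff (a : List Int) (m : Nat) :
    ∀ i : Nat, (checkLoop a (m : Int) (i : Int) = true ↔
      ∀ j : Nat, i ≤ j → j < m → a.getD j 0 = a.getD (m + j) 0) := by
  intro i
  induction hk : m - i using Nat.strong_induction_on generalizing i with
  | _ k ih =>
    rw [checkLoop]
    by_cases hlt : (i : Int) < (m : Int)
    · have him : i < m := by exact_mod_cast hlt
      simp only [hlt, dif_pos]
      have hcast : ((m : Int) + (i : Int)) = (((m + i : Nat) : Int)) := by push_cast; ring
      rw [hcast]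
      simp only [PySem.List.pyGetD_natCast]
      by_cases heq : a.getD i 0 = a.getD (m + i) 0
      · simp only [heq, ne_eq, not_true_eq_false, if_neg, not_false_eq_true]
        have : ((i : Int) + 1) = (((i + 1 : Nat) : Int)) := by push_cast; ring
        rw [this, ih (m - (i+1)) (by omega) (i+1) rfl]
        constructor
        · intro h j hij hjm
          rcases Nat.eq_or_lt_of_le hij with h' | h'
          · subst h'; exact heq
          · exact h j h' hjm
        · intro h j hij hjm; exact h j (by omega) hjm
      · simp only [heq, ne_eq, not_false_eq_true, if_pos]
        constructor
        · intro h; cases h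
        · intro h; exact absurd (h i le_rfl him) heq
    · have him : ¬ i < m := by exact_mod_cast hlt
      simp only [hlt, dif_neg, not_false_eq_true]
      constructor
      · intro _ j hij hjm; omega
      · intro _; trivial

theorem halves_iff (a : List Int) (m : Nat) (hlen : a.length = 2 * m) :
    (a.take m = a.drop m) ↔ ∀ j : Nat, j < m → a.getD j 0 = a.getD (m + j) 0 := by
  constructor
  · intro h j hj
    have h1 : (a.take m).getD j 0 = (a.drop m).getD j 0 := by rw [h]
    rw [List.getD_eq_getElem?_getD, List.getD_eq_getElem?_getD,
        List.getElem?_take, List.getElem?_drop] at h1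
    simp only [hj, if_pos] at h1
    rw [List.getD_eq_getElem?_getD, List.getD_eq_getElem?_getD]
    exact h1
  · intro h
    apply List.ext_getElem
    · simp [hlen]; omega
    · intro j h1 h2
      have hj : j < m := by simp [hlen] at h1; omega
      have := h j hj
      rw [List.getD_eq_getElem?_getD, List.getD_eq_getElem?_getD] at this
      have hja : j < a.length := by omega
      have hmja : m + j < a.length := by omega
      rw [List.getElem?_eq_getElem hja, List.getElem?_eq_getElem hmja] at this
      simp only [Option.getD_some] at this
      simpa [List.getElem_take, List.getElem_drop] using this

-- ===== VERDICT (by name: the statement is the Claim_ definition above) =====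
theorem check_spec : Claim_equal_check := by
  intro a _
  unfold Spec_check check check_alt
  have hfd : PySem.Int.floordiv (a.length : Int) 2 = ((a.length / 2 : Nat) : Int) := by
    rw [PySem.Int.floordiv_eq_ediv_of_pos (by norm_num)]; omega
  have hmod : PySem.Int.mod (a.length : Int) 2 = ((a.length % 2 : Nat) : Int) := by
    rw [PySem.Int.mod_eq_emod_of_pos (by norm_num)]; omega
  simp only [hfd, hmod]
  by_cases hpar : a.length % 2 = 0
  · rw [hpar]
    set m : Nat := a.length / 2 with hm
    have hlen : a.length = 2 * m := by omega
    simp only [Nat.cast_zero]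
    rw [if_neg (by norm_num), PySem.List.slice_to_natCast, PySem.List.slice_from_natCast]
    have h0 : ((0 : Nat) : Int) = (0 : Int) := rfl
    simp only [beq_self_eq_true, Bool.true_and]
    rw [← h0, Bool.eq_iff_iff, checkLoop_iff a m 0, beq_iff_eq, halves_iff a m hlen]
    constructor
    · intro h j hj; exact h j (Nat.zero_le j) hj
    · intro h j _ hj; exact h j hj
  · have hne : ((a.length % 2 : Nat) : Int) ≠ 0 := by exact_mod_cast hpar
    rw [if_pos hne]
    have hb : (((a.length % 2 : Nat) : Int) == 0) = false := by simpa [beq_iff_eq] using hne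
    rw [hb, Bool.false_and]
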